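-- pv_equiv track=rewrite | github.com/981377660LMT/algorithm-study | 1_stack/括号/544. 输出比赛匹配对.py | findContestMatch2
-- ===== SOURCE A (Python) =====
-- def findContestMatch2(n: int) -> str:
--     res = list(map(str, range(1, n + 1)))
--     while len(res) > 1:
--         next = []
--         for i in range(len(res) // 2):
--             # i 与 n-1-i配对
--             next.append(f'({res[i]},{res[-i-1]})')
--         res = next
--     return res[0]
-- ===== SOURCE B (Python) =====
-- def findContestMatch2(n: int) -> str:
--     def play(names):
--         if len(names) < 2:
--             return names[0]
--         paired = ['({},{})'.format(a, b) for a, b in zip(names, reversed(names))]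
--         return play(paired[:len(names) // 2])
--     return play([str(v) for v in range(1, n + 1)])
-- ===== Notes on version B (the rewrite author's own statement) =====
-- stated objective: alternative
-- what changed: replaces A's imperative while-loop that appends f-strings indexed by i and -i-1 with a recursive helper that zips each round with its own reversal and keeps the first half of the zipped pairs
-- outside the precondition, e.g. on findContestMatch2(0): A raises IndexError, B raises IndexError
import Mathlib
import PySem

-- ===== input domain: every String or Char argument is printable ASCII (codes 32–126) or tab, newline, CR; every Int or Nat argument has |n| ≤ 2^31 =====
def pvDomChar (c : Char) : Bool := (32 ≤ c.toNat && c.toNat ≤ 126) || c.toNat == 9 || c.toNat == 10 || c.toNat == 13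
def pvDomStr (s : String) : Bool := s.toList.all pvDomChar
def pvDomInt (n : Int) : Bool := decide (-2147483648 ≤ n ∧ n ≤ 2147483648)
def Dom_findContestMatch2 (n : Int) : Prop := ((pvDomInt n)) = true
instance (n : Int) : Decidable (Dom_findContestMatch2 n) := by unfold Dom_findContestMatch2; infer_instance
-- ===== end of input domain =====

-- B replaces A's index-based while-loop by a recursive helper zipping each round with its reversal and slicing the first half (alternative decomposition, same cost).

-- ===== PORT A =====
-- while len(res) > 1: next = []; for i in range(len(res)//2): next.append(f'({res[i]},{res[-i-1]})'); res = next
-- indices i and -i-1 are always in range inside the loop, so pyGetD's default is unreachable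
def pvLoopA (res : List String) : List String :=
  if _h : res.length > 1 then
    pvLoopA ((PySem.List.pyRange 0 (PySem.Int.floordiv res.length 2) 1).foldl
      (fun next i => next ++ ["(" ++ PySem.List.pyGetD res i "" ++ "," ++ PySem.List.pyGetD res (-i-1) "" ++ ")"]) [])
  else res
termination_by res.length
decreasing_by
  rw [PySem.List.foldl_append_singleton_eq_map]
  simp only [List.nil_append, List.length_map, PySem.List.length_pyRange_one,
    PySem.Int.floordiv_eq_ediv_of_pos (by omega : (0:Int) < 2)]
  omega

def findContestMatch2 (n : Int) : String :=
  let res := (PySem.List.pyRange 1 (n+1) 1).map PySem.Int.toStr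
  PySem.List.pyGetD (pvLoopA res) 0 ""   -- res[0]; n ≤ 0 (empty final list) is excluded by Pre_

-- ===== PORT B =====
-- def play(names): if len(names) < 2: return names[0]
--   paired = ['({},{})'.format(a, b) for a, b in zip(names, reversed(names))]
--   return play(paired[:len(names) // 2])
def pvPlay (names : List String) : String :=
  if _h : names.length < 2 then PySem.List.pyGetD names 0 ""   -- names[0]; empty list excluded by Pre_
  else
    pvPlay (PySem.List.slice ((names.zip names.reverse).map
        (fun p => "(" ++ p.1 ++ "," ++ p.2 ++ ")"))
      none (some (PySem.Int.floordiv names.length 2)))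
termination_by names.length
decreasing_by
  rw [(by rw [PySem.Int.floordiv_eq_ediv_of_pos (by omega : (0:Int) < 2)]; omega :
        PySem.Int.floordiv ((names.length : Int)) 2 = ((names.length / 2 : Nat) : Int)),
      PySem.List.slice_to_natCast]
  simp only [List.length_take, List.length_map, List.length_zip]
  omega

def findContestMatch2_alt (n : Int) : String :=
  pvPlay ((PySem.List.pyRange 1 (n+1) 1).map PySem.Int.toStr)

-- ===== PRECONDITION & SPEC =====
-- Pre_ excludes n ≤ 0, where A's final res[0] raises IndexError on the empty list (B raises there too).
def Pre_findContestMatch2 (n : Int) : Prop := 1 ≤ n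
instance (n : Int) : Decidable (Pre_findContestMatch2 n) := by unfold Pre_findContestMatch2; infer_instance
def pvWitness_findContestMatch2 : Int := 4

def Spec_findContestMatch2 (n : Int) (out : String) : Prop := out = findContestMatch2_alt n
instance (n : Int) (out : String) : Decidable (Spec_findContestMatch2 n out) := by unfold Spec_findContestMatch2; infer_instance

-- ===== CLAIM (what is proved, stated in full; the proofs are below) =====
def Claim_equal_findContestMatch2 : Prop := ∀ (n : Int), Dom_findContestMatch2 n → Pre_findContestMatch2 n → Spec_findContestMatch2 n (findContestMatch2 n)

-- ===== LEMMAS AND PROOFS =====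

-- A's foldl-built round (pair res[i] with res[-i-1]) is B's zip-with-reversal round sliced to the first half
theorem pvRound_eq (res : List String) :
    (PySem.List.pyRange 0 (PySem.Int.floordiv res.length 2) 1).foldl
      (fun next i => next ++ ["(" ++ PySem.List.pyGetD res i "" ++ "," ++ PySem.List.pyGetD res (-i-1) "" ++ ")"]) []
    = PySem.List.slice ((res.zip res.reverse).map
        (fun p => "(" ++ p.1 ++ "," ++ p.2 ++ ")"))
      none (some (PySem.Int.floordiv res.length 2)) := by
  rw [PySem.List.foldl_append_singleton_eq_map, List.nil_append,
    (by rw [PySem.Int.floordiv_eq_ediv_of_pos (by omega : (0:Int) < 2)]; omega :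
      PySem.Int.floordiv ((res.length : Int)) 2 = ((res.length / 2 : Nat) : Int)),
    PySem.List.slice_to_natCast, PySem.List.pyRange_zero_natCast]
  apply List.ext_getElem
  · simp only [List.length_map, List.length_range, List.length_take, List.length_zip,
      List.length_reverse]
    omega
  · intro i h1 h2
    simp only [List.length_map, List.length_range] at h1
    have hi : i < res.length := by omega
    have hrev : i < res.reverse.length := by simpa using hi
    simp only [List.getElem_map, List.getElem_range, List.getElem_take,
      List.getElem_zip, List.getElem_reverse]
    rw [PySem.List.pyGetD_eq_getElem res "" (by omega) (by exact_mod_cast hi),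
      (by push_cast; ring : -(i : Int) - 1 = -(((i + 1 : Nat)) : Int)),
      PySem.List.pyGetD_neg_natCast res (i + 1) "" (by omega) (by omega)]
    have hidx : res.length - (i + 1) = res.length - 1 - i := by omega
    simp [hidx]

-- A's loop followed by [0] is exactly B's recursion, on every starting list
theorem pvLoop_eq_play (res : List String) :
    PySem.List.pyGetD (pvLoopA res) 0 "" = pvPlay res := by
  by_cases h : res.length > 1
  · rw [pvLoopA, dif_pos h, pvPlay, dif_neg (by omega), pvRound_eq]
    exact pvLoop_eq_play _
  · rw [pvLoopA, dif_neg h, pvPlay, dif_pos (by omega)]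
termination_by res.length
decreasing_by
  rw [(by rw [PySem.Int.floordiv_eq_ediv_of_pos (by omega : (0:Int) < 2)]; omega :
        PySem.Int.floordiv ((res.length : Int)) 2 = ((res.length / 2 : Nat) : Int)),
      PySem.List.slice_to_natCast]
  simp only [List.length_take, List.length_map, List.length_zip, List.length_reverse]
  omega

-- ===== VERDICT (by name: the statement is the Claim_ definition above) =====
theorem findContestMatch2_spec : Claim_equal_findContestMatch2 := by
  intro n _ _
  unfold Spec_findContestMatch2 findContestMatch2 findContestMatch2_alt
  exact pvLoop_eq_play _
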